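-- pv_equiv track=rewrite | github.com/sghawana/community-detection | helper_functions.py | remove_edge
-- ===== SOURCE A (Python) =====
-- def remove_edge(graph, edgelist):
--     new_graph = {node: neighbors[:] for node, neighbors in graph.items()}
--     for edge in edgelist:
--         u, v = edge
--         if u in new_graph and v in new_graph[u]:
--             new_graph[u].remove(v)
--         if v in new_graph and u in new_graph[v]:
--             new_graph[v].remove(u)
--     return new_graph
-- ===== SOURCE B (Python) =====
-- def remove_edge(graph, edgelist):
--     # Aggregate removal requests per node, then filter each adjacency list once.
--     removals = {}
--     for u, v in edgelist:
--         ru = removals.get(u, {})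
--         ru[v] = ru.get(v, 0) + 1
--         removals[u] = ru
--         rv = removals.get(v, {})
--         rv[u] = rv.get(u, 0) + 1
--         removals[v] = rv
--     result = {}
--     for node, neighbors in graph.items():
--         cnt = dict(removals.get(node, {}))
--         kept = []
--         for x in neighbors:
--             c = cnt.get(x, 0)
--             if c:
--                 cnt[x] = c - 1
--             else:
--                 kept.append(x)
--         result[node] = kept
--     return result
-- ===== Notes on version B (the rewrite author's own statement) =====
-- stated objective: alternative
-- what changed: Instead of scanning and re-scanning adjacency lists per edge (membership test + list.remove each time), B aggregates removal requests per node into a nested counter dict in one pass over the edges, then filters each adjacency list once, decrementing counters; Pre_ only requires distinct keys in the association list, as any Python dict has.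
import Mathlib
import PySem

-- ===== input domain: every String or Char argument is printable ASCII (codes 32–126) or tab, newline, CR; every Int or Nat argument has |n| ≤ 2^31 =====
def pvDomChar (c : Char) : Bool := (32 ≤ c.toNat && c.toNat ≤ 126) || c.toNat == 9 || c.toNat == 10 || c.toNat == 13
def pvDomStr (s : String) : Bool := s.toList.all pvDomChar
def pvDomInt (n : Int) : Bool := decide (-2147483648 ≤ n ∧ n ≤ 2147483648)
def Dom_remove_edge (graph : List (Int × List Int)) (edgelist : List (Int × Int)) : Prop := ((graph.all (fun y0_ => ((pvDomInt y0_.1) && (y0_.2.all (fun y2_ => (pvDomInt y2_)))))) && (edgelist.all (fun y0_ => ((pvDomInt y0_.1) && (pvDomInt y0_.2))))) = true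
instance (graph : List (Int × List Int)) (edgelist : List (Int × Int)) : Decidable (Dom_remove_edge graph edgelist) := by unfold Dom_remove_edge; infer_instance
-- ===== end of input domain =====

-- B aggregates removal requests per node into a counter dict, then filters each adjacency list
-- once, instead of A's per-edge membership test + list.remove; return-value equivalence only.

-- ===== PORT A =====
-- one conditional removal: "if u in new_graph and v in new_graph[u]: new_graph[u].remove(v)"
def pvAUpd (d : PySem.Dict Int (List Int)) (u v : Int) : PySem.Dict Int (List Int) :=
  if d.contains u && (d.getD u []).contains v then
    d.insert u ((PySem.List.remove? (d.getD u []) v).getD (d.getD u []))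
  else d

def pvAStep (d : PySem.Dict Int (List Int)) (e : Int × Int) : PySem.Dict Int (List Int) :=
  pvAUpd (pvAUpd d e.1 e.2) e.2 e.1

def remove_edge (graph : List (Int × List Int)) (edgelist : List (Int × Int)) : List (Int × List Int) :=
  -- new_graph = {node: neighbors[:] for node, neighbors in graph.items()}
  let new_graph : PySem.Dict Int (List Int) :=
    graph.foldl (fun d p => d.insert p.1 p.2) PySem.Dict.empty
  (edgelist.foldl pvAStep new_graph).items

-- ===== PORT B =====
def pvBCountStep (r : PySem.Dict Int (PySem.Dict Int Int)) (e : Int × Int) :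
    PySem.Dict Int (PySem.Dict Int Int) :=
  let r := r.insert e.1 ((r.getD e.1 PySem.Dict.empty).modify e.2 0 (· + 1))
  r.insert e.2 ((r.getD e.2 PySem.Dict.empty).modify e.1 0 (· + 1))

def pvBFilter (cnt : PySem.Dict Int Int) (neighbors : List Int) : List Int :=
  (neighbors.foldl (fun (acc : List Int × PySem.Dict Int Int) x =>
      let c := acc.2.getD x 0
      if c ≠ 0 then (acc.1, acc.2.insert x (c - 1)) else (acc.1 ++ [x], acc.2))
    ([], cnt)).1

def remove_edge_alt (graph : List (Int × List Int)) (edgelist : List (Int × Int)) : List (Int × List Int) :=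
  let removals := edgelist.foldl pvBCountStep PySem.Dict.empty
  graph.map (fun p => (p.1, pvBFilter (removals.getD p.1 PySem.Dict.empty) p.2))

-- ===== PRECONDITION & SPEC =====
-- graph is a Python dict, so its association list has distinct keys; duplicate keys
-- cannot arise from A's Python input and represent no dict, so they are excluded.
def Pre_remove_edge (graph : List (Int × List Int)) (edgelist : List (Int × Int)) : Prop :=
  (graph.map Prod.fst).Nodup
instance (graph : List (Int × List Int)) (edgelist : List (Int × Int)) : Decidable (Pre_remove_edge graph edgelist) := by unfold Pre_remove_edge; infer_instance

def pvWitness_remove_edge : (List (Int × List Int)) × (List (Int × Int)) :=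
  ([(1, [2, 3]), (2, [1]), (3, [1])], [(1, 2)])

def Spec_remove_edge (graph : List (Int × List Int)) (edgelist : List (Int × Int)) (out : List (Int × List Int)) : Prop := out = remove_edge_alt graph edgelist
instance (graph : List (Int × List Int)) (edgelist : List (Int × Int)) (out : List (Int × List Int)) : Decidable (Spec_remove_edge graph edgelist out) := by unfold Spec_remove_edge; infer_instance

-- ===== CLAIM (what is proved, stated in full; the proofs are below) =====
def Claim_equal_remove_edge : Prop := ∀ (graph : List (Int × List Int)) (edgelist : List (Int × Int)), Dom_remove_edge graph edgelist → Pre_remove_edge graph edgelist → Spec_remove_edge graph edgelist (remove_edge graph edgelist)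

-- ===== LEMMAS AND PROOFS =====

-- the multiset (as a list) of neighbours the edge list asks to remove from node n's list
def pvTgts (n : Int) (es : List (Int × Int)) : List Int :=
  es.flatMap (fun e => (if e.1 = n then [e.2] else []) ++ (if e.2 = n then [e.1] else []))

-- pure counter-filter: drop the first (f x) occurrences of each x
def pvPureFilt (f : Int → Nat) : List Int → List Int
  | [] => []
  | x :: xs => if f x ≠ 0 then pvPureFilt (fun y => if y = x then f x - 1 else f y) xs
               else x :: pvPureFilt f xs

-- ---- A side ----

theorem pvAUpd_items (d : PySem.Dict Int (List Int)) (u v : Int) (hnd : d.keys.Nodup) :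
    (pvAUpd d u v).items = d.items.map (fun p => if p.1 = u then (p.1, p.2.erase v) else p) := by
  unfold pvAUpd
  by_cases hc : d.contains u = true
  · by_cases hv : (d.getD u []).contains v = true
    · have hvm : v ∈ d.getD u [] := by rw [← List.contains_iff_mem]; exact hv
      rw [if_pos (by simp only [Bool.and_eq_true]; exact ⟨hc, hv⟩)]
      rw [PySem.List.remove?_eq_some_erase _ _ hvm, Option.getD_some,
          PySem.Dict.items_insert_of_contains _ _ hc]
      apply List.map_congr_left
      intro p hp
      by_cases hpu : p.1 = u
      · have hval : d.getD u [] = p.2 := by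
          subst hpu; exact PySem.Dict.getD_of_mem_items d (by simpa using hp) hnd []
        simp [hpu, hval]
      · simp [hpu, show (p.1 == u) = false by simpa using hpu]
    · have hvm : v ∉ d.getD u [] := by rw [← List.contains_iff_mem]; exact hv
      rw [if_neg (by simp only [Bool.and_eq_true]; rintro ⟨-, h⟩; exact hv h)]
      conv_lhs => rw [← List.map_id d.items]
      apply List.map_congr_left
      intro p hp
      by_cases hpu : p.1 = u
      · have hval : d.getD u [] = p.2 := by
          subst hpu; exact PySem.Dict.getD_of_mem_items d (by simpa using hp) hnd []
        have hnm : v ∉ p.2 := hval ▸ hvm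
        rw [if_pos hpu, List.erase_of_not_mem hnm]
        rfl
      · rw [if_neg hpu]
        rfl
  · rw [if_neg (by simp only [Bool.and_eq_true]; rintro ⟨h, -⟩; exact hc h)]
    conv_lhs => rw [← List.map_id d.items]
    apply List.map_congr_left
    intro p hp
    have hne : p.1 ≠ u := by
      intro h
      have hmem : d.contains p.1 = true := by
        rw [PySem.Dict.contains_iff_mem_keys]
        exact PySem.Dict.mem_keys_of_mem_items d hp
      rw [h] at hmem; simp [hc] at hmem
    rw [if_neg hne]
    rfl

theorem pvAUpd_keys (d : PySem.Dict Int (List Int)) (u v : Int) (hnd : d.keys.Nodup) :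
    (pvAUpd d u v).keys = d.keys := by
  show (pvAUpd d u v).items.map Prod.fst = d.items.map Prod.fst
  rw [pvAUpd_items d u v hnd, List.map_map]
  apply List.map_congr_left
  intro p _
  by_cases h : p.1 = u <;> simp [h]

theorem pvAStep_items (d : PySem.Dict Int (List Int)) (e : Int × Int) (hnd : d.keys.Nodup) :
    (pvAStep d e).items =
      d.items.map (fun p => (p.1, (pvTgts p.1 [e]).foldl (fun l t => l.erase t) p.2)) := by
  unfold pvAStep
  rw [pvAUpd_items _ e.2 e.1 (by rw [pvAUpd_keys d e.1 e.2 hnd]; exact hnd),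
      pvAUpd_items d e.1 e.2 hnd, List.map_map]
  apply List.map_congr_left
  rcases e with ⟨a, b⟩
  intro p _
  rcases p with ⟨n, l⟩
  simp only [Function.comp, pvTgts, List.flatMap_cons, List.flatMap_nil, List.append_nil]
  by_cases h1 : n = a <;> by_cases h2 : n = b
  · rw [if_pos h1]; dsimp only
    rw [if_pos h2, if_pos h1.symm, if_pos h2.symm]; simp [List.foldl]
  · rw [if_pos h1]; dsimp only
    rw [if_pos h1.symm, if_neg h2, if_neg (fun h => h2 h.symm)]; simp [List.foldl]
  · rw [if_neg h1]; dsimp only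
    rw [if_pos h2, if_neg (fun h => h1 h.symm), if_pos h2.symm]; simp [List.foldl]
  · rw [if_neg h1]; dsimp only
    rw [if_neg h2, if_neg (fun h => h1 h.symm), if_neg (fun h => h2 h.symm)]
    simp

theorem pvAStep_keys (d : PySem.Dict Int (List Int)) (e : Int × Int) (hnd : d.keys.Nodup) :
    (pvAStep d e).keys = d.keys := by
  unfold pvAStep
  rw [pvAUpd_keys _ e.2 e.1 (by rw [pvAUpd_keys d e.1 e.2 hnd]; exact hnd),
      pvAUpd_keys d e.1 e.2 hnd]

theorem pvTgts_cons (n : Int) (e : Int × Int) (es : List (Int × Int)) :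
    pvTgts n (e :: es) = pvTgts n [e] ++ pvTgts n es := by
  simp [pvTgts]

theorem pvAFold_items (es : List (Int × Int)) (d : PySem.Dict Int (List Int))
    (hnd : d.keys.Nodup) :
    (es.foldl pvAStep d).items =
      d.items.map (fun p => (p.1, (pvTgts p.1 es).foldl (fun l t => l.erase t) p.2)) := by
  induction es generalizing d with
  | nil => simp [pvTgts]
  | cons e es ih =>
    rw [List.foldl_cons, ih (pvAStep d e) (by rw [pvAStep_keys d e hnd]; exact hnd),
      pvAStep_items d e hnd, List.map_map]
    apply List.map_congr_left
    intro p _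
    simp only [Function.comp]
    rw [show pvTgts p.1 (e :: es) = pvTgts p.1 [e] ++ pvTgts p.1 es from pvTgts_cons p.1 e es,
      List.foldl_append]

theorem pvA_init_items (graph : List (Int × List Int)) (hnd : (graph.map Prod.fst).Nodup) :
    (graph.foldl (fun d p => d.insert p.1 p.2) PySem.Dict.empty).items = graph := by
  have h := PySem.Dict.items_foldl_insert_fresh (l := graph) (k := Prod.fst) (v := Prod.snd)
      (d := (PySem.Dict.empty : PySem.Dict Int (List Int)))
      (by intro a _; simp [PySem.Dict.contains_empty]) (by simpa using hnd)
  simpa using h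

-- ---- B side ----

theorem pvBOne (r : PySem.Dict Int (PySem.Dict Int Int)) (k t n x : Int) :
    ((r.insert k ((r.getD k PySem.Dict.empty).modify t 0 (· + 1))).getD n PySem.Dict.empty).getD x 0
      = (r.getD n PySem.Dict.empty).getD x 0 + (if n = k then (if x = t then 1 else 0) else 0) := by
  rw [PySem.Dict.getD_insert]
  by_cases hn : n = k
  · subst hn
    rw [if_pos rfl, if_pos rfl, PySem.Dict.getD_modify]
    by_cases hx : x = t
    · subst hx; rw [if_pos rfl, if_pos rfl]
    · rw [if_neg hx, if_neg hx]; ring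
  · rw [if_neg hn, if_neg hn]; ring

theorem pvBCount_getD (es : List (Int × Int)) (r : PySem.Dict Int (PySem.Dict Int Int))
    (n x : Int) :
    ((es.foldl pvBCountStep r).getD n PySem.Dict.empty).getD x 0 =
      (r.getD n PySem.Dict.empty).getD x 0 + ((pvTgts n es).count x : Int) := by
  induction es generalizing r with
  | nil => simp [pvTgts]
  | cons e es ih =>
    rw [List.foldl_cons, ih, pvTgts_cons, List.count_append]
    have hstep : ((pvBCountStep r e).getD n PySem.Dict.empty).getD x 0 =
        (r.getD n PySem.Dict.empty).getD x 0 + ((pvTgts n [e]).count x : Int) := by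
      rcases e with ⟨a, b⟩
      unfold pvBCountStep
      dsimp only
      rw [pvBOne, pvBOne]
      simp only [pvTgts, List.flatMap_cons, List.flatMap_nil, List.append_nil,
        List.count_append, apply_ite (fun l : List Int => l.count x), List.count_cons,
        List.count_nil, beq_iff_eq, Nat.cast_ite, Nat.cast_add, Nat.cast_zero, Nat.cast_one]
      split_ifs <;> omega
    rw [hstep]; push_cast; ring

theorem pvBFilter_go (l : List Int) (acc : List Int) (c : PySem.Dict Int Int) (f : Int → Nat)
    (hf : ∀ x, c.getD x 0 = (f x : Int)) :
    (l.foldl (fun (acc : List Int × PySem.Dict Int Int) x =>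
        let c := acc.2.getD x 0
        if c ≠ 0 then (acc.1, acc.2.insert x (c - 1)) else (acc.1 ++ [x], acc.2))
      (acc, c)).1 = acc ++ pvPureFilt f l := by
  induction l generalizing acc c f with
  | nil => simp [pvPureFilt]
  | cons x xs ih =>
    simp only [List.foldl_cons]
    by_cases h : f x = 0
    · rw [show (if (c.getD x 0 ≠ 0) then ((acc, c).1, (c.getD x 0 - 1) |> (c.insert x ·)) else ((acc, c).1 ++ [x], c)) = ((acc ++ [x], c) : List Int × PySem.Dict Int Int) from by rw [hf x, h]; simp]
      rw [ih (acc ++ [x]) c f hf]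
      simp [pvPureFilt, h]
    · rw [show (if (c.getD x 0 ≠ 0) then ((acc, c).1, (c.getD x 0 - 1) |> (c.insert x ·)) else ((acc, c).1 ++ [x], c)) = ((acc, c.insert x ((f x : Int) - 1)) : List Int × PySem.Dict Int Int) from by rw [hf x]; simp [h]]
      rw [ih acc _ (fun y => if y = x then f x - 1 else f y) (by
        intro y
        rw [PySem.Dict.getD_insert]
        by_cases hy : y = x
        · simp only [hy, if_pos rfl]; push_cast [Nat.cast_sub (Nat.one_le_iff_ne_zero.mpr h)]; ring
        · simp [hy, hf y])]
      simp [pvPureFilt, h]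

theorem pvPureFilt_incr (t : Int) (f : Int → Nat) (l : List Int) :
    pvPureFilt (fun y => if y = t then f y + 1 else f y) l = pvPureFilt f (l.erase t) := by
  induction l generalizing f with
  | nil => simp [pvPureFilt]
  | cons x xs ih =>
    by_cases hx : x = t
    · subst hx
      rw [List.erase_cons_head]
      simp only [pvPureFilt]
      norm_num
      congr 1
      funext y
      by_cases hy : y = x <;> simp [hy]
    · rw [List.erase_cons_tail (by simpa using hx)]
      simp only [pvPureFilt, if_neg hx]
      by_cases hfx : f x = 0
      · rw [if_neg (by simp [hfx]), if_neg (by simp [hfx])]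
        rw [ih f]
      · rw [if_pos (by simpa using hfx), if_pos (by simpa using hfx)]
        rw [show (fun y => if y = x then f x - 1 else if y = t then f y + 1 else f y)
              = (fun y => if y = t then (if y = x then f x - 1 else f y) + 1 else (if y = x then f x - 1 else f y)) from by
            funext y
            by_cases hy1 : y = x <;> by_cases hy2 : y = t <;>
              simp [hy1, hy2, hx, (show ¬t = x from fun h => hx h.symm)],
          ih]

theorem pvPureFilt_count (ts l : List Int) :
    pvPureFilt (fun x => ts.count x) l = ts.foldl (fun l t => l.erase t) l := by
  induction ts generalizing l with
  | nil =>
    simp only [List.foldl_nil, List.count_nil]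
    induction l with
    | nil => rfl
    | cons x xs ih => simp only [pvPureFilt, ih]; simp
  | cons t ts ih =>
    rw [List.foldl_cons, ← ih (l.erase t), ← pvPureFilt_incr t]
    congr 1
    funext y
    by_cases hy : y = t <;> simp [hy, List.count_cons] <;> omega

-- ===== VERDICT (by name: the statement is the Claim_ definition above) =====
theorem remove_edge_spec : Claim_equal_remove_edge := by
  intro graph edgelist _ hpre
  unfold Spec_remove_edge remove_edge remove_edge_alt
  have hnd0 : ((graph.foldl (fun d p => d.insert p.1 p.2) PySem.Dict.empty :
      PySem.Dict Int (List Int)).keys).Nodup := by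
    show ((graph.foldl (fun d p => d.insert p.1 p.2) PySem.Dict.empty :
      PySem.Dict Int (List Int)).items.map Prod.fst).Nodup
    rw [pvA_init_items graph hpre]; exact hpre
  rw [pvAFold_items edgelist _ hnd0, pvA_init_items graph hpre]
  apply List.map_congr_left
  intro p _
  have hcnt : ∀ x, (((edgelist.foldl pvBCountStep PySem.Dict.empty).getD p.1
      PySem.Dict.empty).getD x 0) = ((pvTgts p.1 edgelist).count x : Int) := by
    intro x
    rw [pvBCount_getD]
    simp [PySem.Dict.getD_empty]
  have := pvBFilter_go p.2 [] ((edgelist.foldl pvBCountStep PySem.Dict.empty).getD p.1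
      PySem.Dict.empty) (fun x => (pvTgts p.1 edgelist).count x) hcnt
  unfold pvBFilter
  rw [this, List.nil_append, pvPureFilt_count]
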